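-- pv_equiv track=rewrite | github.com/BitWattr/NoAI-LG | gpt_made.py | generate_word_details
-- ===== SOURCE A (Python) =====
-- def generate_word_details(sentences):
--     # Dictionary to store word details
--     word_details = {}
--
--     # Process each sentence
--     for sentence in sentences:
--         words = sentence.split()
--         for i, word in enumerate(words):
--             if word not in word_details:
--                 word_details[word] = {"left": [], "right": []}
--
--             # Add left word if exists
--             if i > 0:
--                 left_word = words[i - 1]
--                 if left_word not in word_details[word]["left"]:
--                     word_details[word]["left"].append(left_word)
--
--             # Add right word if exists
--             if i < len(words) - 1:
--                 right_word = words[i + 1]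
--                 if right_word not in word_details[word]["right"]:
--                     word_details[word]["right"].append(right_word)
--     return word_details
-- ===== SOURCE B (Python) =====
-- def generate_word_details(sentences):
--     tokenized = [sentence.split() for sentence in sentences]
--     # stage 1: global key order = first appearance of each word
--     order = []
--     seen = set()
--     for words in tokenized:
--         for w in words:
--             if w not in seen:
--                 seen.add(w)
--                 order.append(w)
--     # stage 2: flatten all adjacency into a tagged event stream
--     events = []
--     for words in tokenized:
--         for a, b in zip(words, words[1:]):
--             events.append((b, "left", a))
--             events.append((a, "right", b))
--     # stage 3: group the events into the pre-built skeleton, deduplicating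
--     result = {w: {"left": [], "right": []} for w in order}
--     for w, side, n in events:
--         lst = result[w][side]
--         if n not in lst:
--             lst.append(n)
--     return result
-- ===== Notes on version B (the rewrite author's own statement) =====
-- stated objective: alternative
-- what changed: Replaces A's single interleaved pass (per-token dict updates using i-1/i+1 index lookups) with three staged global passes: a first-appearance key-order pass using a seen-set, flattening all adjacency into a tagged (word, side, neighbor) event stream, then one grouping fold of the events into a pre-built skeleton dict.
import Mathlib
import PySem

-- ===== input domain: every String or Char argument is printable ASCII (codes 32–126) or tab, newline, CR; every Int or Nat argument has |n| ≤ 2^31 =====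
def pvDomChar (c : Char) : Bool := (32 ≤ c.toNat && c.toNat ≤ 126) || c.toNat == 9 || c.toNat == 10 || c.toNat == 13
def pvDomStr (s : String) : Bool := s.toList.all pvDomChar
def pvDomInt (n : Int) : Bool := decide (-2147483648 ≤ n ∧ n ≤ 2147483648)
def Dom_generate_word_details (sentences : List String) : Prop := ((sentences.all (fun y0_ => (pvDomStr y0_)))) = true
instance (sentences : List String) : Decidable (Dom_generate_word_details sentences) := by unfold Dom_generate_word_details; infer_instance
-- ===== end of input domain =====

-- B replaces A's single interleaved pass (per-token dict updates with i-1/i+1 index lookups)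
-- by three staged global passes: first-appearance key order via a seen-set, a flat tagged
-- (word, side, neighbor) event stream over all adjacent pairs, then one grouping fold into a
-- pre-built skeleton; objective: alternative decomposition (same asymptotic cost).
-- The Python inner dict always has exactly the keys "left" and "right", fixed at creation;
-- both ports encode it as a pair of lists and render it as [("left", l), ("right", r)] on return.

-- ===== PORT A =====
abbrev pvWD := PySem.Dict String (List String × List String)

def pvRender (d : pvWD) : List (String × List (String × List String)) :=
  d.items.map (fun p => (p.1, [("left", p.2.1), ("right", p.2.2)]))

def pvStepA (ws : List String) (d : pvWD) (iw : Int × String) : pvWD :=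
  let i := iw.1
  let word := iw.2
  let d1 := if d.contains word then d else d.insert word ([], [])
  let d2 := if 0 < i then
      let left_word := PySem.List.pyGetD ws (i - 1) ""
      d1.modify word ([], []) (fun q => if left_word ∈ q.1 then q else (q.1 ++ [left_word], q.2))
    else d1
  if i < (ws.length : Int) - 1 then
      let right_word := PySem.List.pyGetD ws (i + 1) ""
      d2.modify word ([], []) (fun q => if right_word ∈ q.2 then q else (q.1, q.2 ++ [right_word]))
  else d2

def generate_word_details (sentences : List String) : List (String × List (String × List String)) :=
  pvRender (sentences.foldl (fun d sentence =>
    let words := PySem.Str.split₀ sentence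
    (PySem.List.enumerate words).foldl (pvStepA words) d) PySem.Dict.empty)

-- ===== PORT B =====
-- one event of B's stage-2 stream: (word, side tag "left"/"right", neighbor)
def pvEvStep (d : pvWD) (e : String × String × String) : pvWD :=
  d.modify e.1 ([], []) (fun q =>
    if e.2.1 == "left" then (if e.2.2 ∈ q.1 then q else (q.1 ++ [e.2.2], q.2))
    else (if e.2.2 ∈ q.2 then q else (q.1, q.2 ++ [e.2.2])))

def generate_word_details_alt (sentences : List String) : List (String × List (String × List String)) :=
  let tokenized := sentences.map (fun sentence => PySem.Str.split₀ sentence)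
  -- stage 1: global key order = first appearance of each word (order list + seen set)
  let os := tokenized.foldl (fun os words =>
      words.foldl (fun (os : List String × PySem.Set String) w =>
        if PySem.Set.contains os.2 w then os
        else (os.1 ++ [w], PySem.Set.add os.2 w)) os)
    ([], PySem.Set.empty)
  -- stage 2: flatten all adjacency into a tagged event stream
  let events := tokenized.foldl (fun ev words =>
      (words.zip words.tail).foldl (fun (ev : List (String × String × String)) ab =>
        ev ++ [(ab.2, "left", ab.1), (ab.1, "right", ab.2)]) ev) []
  -- stage 3: group the events into the pre-built skeleton, deduplicating
  let skeleton := os.1.foldl (fun (d : pvWD) w => d.insert w ([], [])) PySem.Dict.empty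
  pvRender (events.foldl pvEvStep skeleton)

-- ===== PRECONDITION & SPEC =====
def Spec_generate_word_details (sentences : List String) (out : List (String × List (String × List String))) : Prop := out = generate_word_details_alt sentences
instance (sentences : List String) (out : List (String × List (String × List String))) : Decidable (Spec_generate_word_details sentences out) := by unfold Spec_generate_word_details; infer_instance

-- ===== CLAIM (what is proved, stated in full; the proofs are below) =====
def Claim_equal_generate_word_details : Prop := ∀ (sentences : List String), Dom_generate_word_details sentences → Spec_generate_word_details sentences (generate_word_details sentences)

-- ===== LEMMAS AND PROOFS =====

-- proof-side vocabulary: per-word ensure/left-append/right-append and the per-edge update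
def pvEnsure (d : pvWD) (w : String) : pvWD :=
  if d.contains w then d else d.insert w ([], [])

def pvAddL (d : pvWD) (w x : String) : pvWD :=
  d.modify w ([], []) (fun q => if x ∈ q.1 then q else (q.1 ++ [x], q.2))

def pvAddR (d : pvWD) (w y : String) : pvWD :=
  d.modify w ([], []) (fun q => if y ∈ q.2 then q else (q.1, q.2 ++ [y]))

def pvEdge (d : pvWD) (ab : String × String) : pvWD :=
  pvAddR (pvAddL d ab.2 ab.1) ab.1 ab.2

theorem contains_addL (d : pvWD) (w x v : String) :
    (pvAddL d w x).contains v = (v == w || d.contains v) :=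
  PySem.Dict.contains_modify d w v ([], []) _

theorem contains_addR (d : pvWD) (w y v : String) :
    (pvAddR d w y).contains v = (v == w || d.contains v) :=
  PySem.Dict.contains_modify d w v ([], []) _

theorem contains_edge (d : pvWD) (a b v : String) :
    (pvEdge d (a, b)).contains v = (v == a || (v == b || d.contains v)) := by
  show (pvAddR (pvAddL d b a) a b).contains v = _
  rw [contains_addR, contains_addL]

theorem contains_ensure (d : pvWD) (w v : String) :
    (pvEnsure d w).contains v = (v == w || d.contains v) := by
  unfold pvEnsure
  by_cases h : d.contains w
  · simp only [h, if_true]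
    by_cases hv : v = w
    · subst hv; simp [h]
    · simp [hv]
  · simp only [h]
    simp [PySem.Dict.contains_insert]

theorem dict_insert_comm_left {ν : Type} (d : PySem.Dict String ν) (k v : String) (w e : ν)
    (hne : v ≠ k) (hk : d.contains k = true) (hv : d.contains v = false) :
    (d.insert v e).insert k w = (d.insert k w).insert v e := by
  have h1 : (d.insert v e).contains k = true := by
    rw [PySem.Dict.contains_insert]; simp [hk]
  have h2 : (d.insert k w).contains v = false := by
    rw [PySem.Dict.contains_insert]; simp [hv, hne]
  apply PySem.Dict.ext
  rw [PySem.Dict.items_insert_of_contains _ _ h1,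
      PySem.Dict.items_insert_of_not_contains _ _ hv,
      PySem.Dict.items_insert_of_not_contains _ _ h2,
      PySem.Dict.items_insert_of_contains _ _ hk]
  simp [hne]

theorem dict_insert_comm_both {ν : Type} (d : PySem.Dict String ν) (k v : String) (w e : ν)
    (hne : v ≠ k) (hk : d.contains k = true) (hv : d.contains v = true) :
    (d.insert v e).insert k w = (d.insert k w).insert v e := by
  have h1 : (d.insert v e).contains k = true := by
    rw [PySem.Dict.contains_insert]; simp [hk]
  have h2 : (d.insert k w).contains v = true := by
    rw [PySem.Dict.contains_insert]; simp [hv]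
  apply PySem.Dict.ext
  rw [PySem.Dict.items_insert_of_contains _ _ h1,
      PySem.Dict.items_insert_of_contains _ _ hv,
      PySem.Dict.items_insert_of_contains _ _ h2,
      PySem.Dict.items_insert_of_contains _ _ hk]
  simp only [List.map_map]
  apply List.map_congr_left
  intro p _
  by_cases hpk : p.1 = k
  · simp [hpk, Ne.symm hne]
  · by_cases hpv : p.1 = v
    · simp [hpv, hne]
    · simp [hpk, hpv]

theorem dict_modify_insert_comm {ν : Type} (d : PySem.Dict String ν) (w v : String) (e d0 : ν) (f : ν → ν)
    (hne : v ≠ w) (hw : d.contains w = true) (hv : d.contains v = false) :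
    (d.insert v e).modify w d0 f = (d.modify w d0 f).insert v e := by
  simp only [PySem.Dict.modify]
  rw [PySem.Dict.getD_insert_of_ne _ _ _ (Ne.symm hne)]
  exact dict_insert_comm_left d w v _ e hne hw hv

theorem dict_modify_modify_comm {ν : Type} (d : PySem.Dict String ν) (a b : String) (d0 : ν) (f g : ν → ν)
    (hab : a ≠ b) (ha : d.contains a = true) (hb : d.contains b = true) :
    (d.modify a d0 f).modify b d0 g = (d.modify b d0 g).modify a d0 f := by
  simp only [PySem.Dict.modify]
  rw [PySem.Dict.getD_insert_of_ne _ _ _ hab,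
      PySem.Dict.getD_insert_of_ne _ _ _ (Ne.symm hab)]
  exact dict_insert_comm_both d b a _ _ hab hb ha

theorem addL_addR_self (d : pvWD) (a x y : String) :
    pvAddL (pvAddR d a y) a x = pvAddR (pvAddL d a x) a y := by
  unfold pvAddL pvAddR
  simp only [PySem.Dict.modify, PySem.Dict.getD_insert_self, PySem.Dict.insert_insert_self]
  congr 1
  obtain ⟨l, r⟩ := d.getD a ([], [])
  by_cases hx : x ∈ l <;> by_cases hy : y ∈ r <;> simp [hx, hy]

theorem ensure_edge_comm (d : pvWD) (a b v : String)
    (ha : d.contains a = true) (hb : d.contains b = true) :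
    pvEnsure (pvEdge d (a, b)) v = pvEdge (pvEnsure d v) (a, b) := by
  by_cases hv : d.contains v = true
  · have h1 : (pvEdge d (a, b)).contains v = true := by
      rw [contains_edge, hv]; simp
    have h2 : pvEnsure d v = d := by unfold pvEnsure; rw [hv]; simp
    unfold pvEnsure; rw [h1, hv]; simp
  · replace hv : d.contains v = false := by simpa using hv
    have hva : v ≠ a := by rintro rfl; rw [hv] at ha; exact absurd ha (by simp)
    have hvb : v ≠ b := by rintro rfl; rw [hv] at hb; exact absurd hb (by simp)
    have h1 : (pvEdge d (a, b)).contains v = false := by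
      rw [contains_edge, hv]; simp [hva, hvb]
    have h2 : pvEnsure d v = d.insert v ([], []) := by unfold pvEnsure; rw [hv]; simp
    rw [show pvEnsure (pvEdge d (a, b)) v = (pvEdge d (a, b)).insert v ([], []) from by
          unfold pvEnsure; rw [h1]; simp, h2]
    show (pvAddR (pvAddL d b a) a b).insert v ([], [])
        = pvAddR (pvAddL (d.insert v ([], [])) b a) a b
    unfold pvAddL pvAddR
    rw [dict_modify_insert_comm d b v ([], []) ([], []) _ hvb hb hv,
        dict_modify_insert_comm _ a v ([], []) ([], []) _ hva
          (by rw [PySem.Dict.contains_modify]; simp [ha])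
          (by rw [PySem.Dict.contains_modify]; simp [hv, hvb])]

theorem foldl_ensure_edge_comm (l : List String) (d : pvWD) (a b : String)
    (ha : d.contains a = true) (hb : d.contains b = true) :
    l.foldl pvEnsure (pvEdge d (a, b)) = pvEdge (l.foldl pvEnsure d) (a, b) := by
  induction l generalizing d with
  | nil => rfl
  | cons v l ih =>
    simp only [List.foldl_cons]
    rw [ensure_edge_comm d a b v ha hb]
    exact ih (pvEnsure d v) (by rw [contains_ensure, ha, Bool.or_true])
      (by rw [contains_ensure, hb, Bool.or_true])

theorem lookahead_comm (d : pvWD) (p b : String) (hp : d.contains p = true) :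
    pvAddL (pvEnsure (pvAddR d p b) b) b p = pvEdge (pvEnsure d b) (p, b) := by
  show _ = pvAddR (pvAddL (pvEnsure d b) b p) p b
  by_cases hb : d.contains b = true
  · have h1 : (pvAddR d p b).contains b = true := by rw [contains_addR]; simp [hb]
    have e1 : pvEnsure (pvAddR d p b) b = pvAddR d p b := by unfold pvEnsure; rw [h1]; simp
    have e2 : pvEnsure d b = d := by unfold pvEnsure; rw [hb]; simp
    rw [e1, e2]
    by_cases hbp : b = p
    · subst hbp; exact addL_addR_self d b b b
    · unfold pvAddL pvAddR
      exact dict_modify_modify_comm d p b ([], []) _ _ (Ne.symm hbp) hp hb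
  · replace hb : d.contains b = false := by simpa using hb
    have hbp : b ≠ p := by rintro rfl; rw [hb] at hp; cases hp
    have h1 : (pvAddR d p b).contains b = false := by rw [contains_addR]; simp [hb, hbp]
    have e1 : pvEnsure (pvAddR d p b) b = (pvAddR d p b).insert b ([], []) := by
      unfold pvEnsure; rw [h1]; simp
    have e2 : pvEnsure d b = d.insert b ([], []) := by
      unfold pvEnsure; rw [hb]; simp
    rw [e1, e2]
    unfold pvAddL pvAddR
    simp only [PySem.Dict.modify, PySem.Dict.getD_insert_self, PySem.Dict.insert_insert_self]
    rw [PySem.Dict.getD_insert_of_ne _ _ _ (Ne.symm hbp)]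
    exact (dict_insert_comm_left d p b _ _ hbp hp hb).symm

def pass1 : pvWD → Option String → List String → pvWD
  | d, _, [] => d
  | d, none, w :: rest => pass1 (pvEnsure d w) (some w) rest
  | d, some p, w :: rest => pass1 (pvEdge (pvEnsure d w) (p, w)) (some w) rest

def pass2 : pvWD → Option String → List String → pvWD
  | d, _, [] => d
  | d, prev, w :: rest =>
    let d1 := pvEnsure d w
    let d2 := match prev with | none => d1 | some p => pvAddL d1 w p
    let d3 := match rest with | [] => d2 | b :: _ => pvAddR d2 w b
    pass2 d3 (some w) rest

theorem pass2_none_cons (d : pvWD) (w : String) (rest : List String) :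
    pass2 d none (w :: rest)
      = pass2 (match rest with
          | [] => pvEnsure d w
          | b :: _ => pvAddR (pvEnsure d w) w b) (some w) rest := rfl

theorem pass2_some_cons (d : pvWD) (p w : String) (rest : List String) :
    pass2 d (some p) (w :: rest)
      = pass2 (match rest with
          | [] => pvAddL (pvEnsure d w) w p
          | b :: _ => pvAddR (pvAddL (pvEnsure d w) w p) w b) (some w) rest := rfl

theorem pass2_eq_pass1_some (ys : List String) (d : pvWD) (p : String) (hp : d.contains p = true) :
    pass2 (match ys with | [] => d | b :: _ => pvAddR d p b) (some p) ys = pass1 d (some p) ys := by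
  induction ys generalizing d p with
  | nil => rfl
  | cons b rest ih =>
    show pass2 (pvAddR d p b) (some p) (b :: rest) = pass1 d (some p) (b :: rest)
    simp only [pass2, pass1]
    rw [lookahead_comm d p b hp]
    have hb : (pvEdge (pvEnsure d b) (p, b)).contains b = true := by
      rw [contains_edge, contains_ensure]; simp
    have h2 := ih (pvEdge (pvEnsure d b) (p, b)) b hb
    cases rest with
    | nil => exact h2
    | cons c rest' => exact h2

theorem pass2_eq_pass1 (ws : List String) (d : pvWD) :
    pass2 d none ws = pass1 d none ws := by
  cases ws with
  | nil => rfl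
  | cons w rest =>
    simp only [pass2, pass1]
    have hw : (pvEnsure d w).contains w = true := by rw [contains_ensure]; simp
    have h2 := pass2_eq_pass1_some rest (pvEnsure d w) w hw
    cases rest with
    | nil => exact h2
    | cons c rest' => exact h2

theorem pass1_some_eq (ws : List String) (d : pvWD) (p : String) (hp : d.contains p = true) :
    pass1 d (some p) ws = (((p :: ws).zip ws).foldl pvEdge (ws.foldl pvEnsure d)) := by
  induction ws generalizing d p with
  | nil => rfl
  | cons w rest ih =>
    simp only [pass1, List.zip_cons_cons, List.foldl_cons]
    have hw : (pvEnsure d w).contains w = true := by rw [contains_ensure]; simp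
    have hp' : (pvEnsure d w).contains p = true := by rw [contains_ensure, hp, Bool.or_true]
    rw [ih (pvEdge (pvEnsure d w) (p, w)) w (by rw [contains_edge, contains_ensure]; simp)]
    rw [foldl_ensure_edge_comm rest (pvEnsure d w) p w hp' hw]

theorem pass1_eq_B (ws : List String) (d : pvWD) :
    pass1 d none ws = (ws.zip ws.tail).foldl pvEdge (ws.foldl pvEnsure d) := by
  cases ws with
  | nil => rfl
  | cons w rest =>
    simp only [pass1, List.tail_cons, List.foldl_cons]
    have hw : (pvEnsure d w).contains w = true := by rw [contains_ensure]; simp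
    rw [pass1_some_eq rest (pvEnsure d w) w hw]

theorem getD_of_drop_cons (ws : List String) (k : Nat) (w : String) (t : List String)
    (h : ws.drop k = w :: t) : ws.getD k "" = w := by
  have h' : ws[k]? = some w := by rw [← List.head?_drop, h]; rfl
  simp [List.getD_eq_getElem?_getD, h']

theorem A_eq_pass2_aux (ws : List String) (ys : List String) (k : Nat) (d : pvWD)
    (h : ws.drop k = ys) :
    (PySem.List.enumerate ys (k : Int)).foldl (pvStepA ws) d
      = pass2 d (if k = 0 then none else some (ws.getD (k - 1) "")) ys := by
  induction ys generalizing k d with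
  | nil => rfl
  | cons w rest ih =>
    have hlen : ws.length = k + rest.length + 1 := by
      have hl := congrArg List.length h
      simp only [List.length_drop, List.length_cons] at hl
      omega
    have hdrop' : ws.drop (k + 1) = rest := by
      have h2 := congrArg (List.drop 1) h
      rw [List.drop_drop] at h2
      simpa using h2
    have hgetk : ws.getD k "" = w := getD_of_drop_cons ws k w rest h
    have hcast : ((k : Int) + 1) = ((k + 1 : Nat) : Int) := by push_cast; ring
    rw [show PySem.List.enumerate (w :: rest) (k : Int)
          = ((k : Int), w) :: PySem.List.enumerate rest ((k : Int) + 1) from rfl,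
        List.foldl_cons, hcast, ih (k + 1) _ hdrop',
        if_neg (by omega : ¬ (k + 1 = 0))]
    simp only [Nat.add_sub_cancel, hgetk]
    cases k with
    | zero =>
      rw [if_pos rfl, pass2_none_cons]
      congr 1
      show pvStepA ws d (((0 : Nat) : Int), w) = _
      simp only [pvStepA, Nat.cast_zero, lt_self_iff_false, if_false]
      cases rest with
      | nil =>
        have hc : ¬ ((0 : Int) < (ws.length : Int) - 1) := by
          simp [hlen]
        rw [if_neg hc]
        rfl
      | cons b rest' =>
        have hc : (0 : Int) < (ws.length : Int) - 1 := by
          simp [hlen]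
        have hr : PySem.List.pyGetD ws ((0 : Int) + 1) "" = b := by
          rw [PySem.List.pyGetD_of_nonneg _ _ (by omega)]
          rw [show ((0 : Int) + 1).toNat = 1 from rfl]
          exact getD_of_drop_cons ws 1 b rest' (by simpa using hdrop')
        rw [if_pos hc, hr]
        rfl
    | succ k' =>
      rw [if_neg (by omega : ¬ (k' + 1 = 0)), pass2_some_cons]
      congr 1
      show pvStepA ws d (((k' + 1 : Nat) : Int), w) = _
      simp only [pvStepA]
      have hpos : (0 : Int) < ((k' + 1 : Nat) : Int) := by push_cast; omega
      have hl : PySem.List.pyGetD ws (((k' + 1 : Nat) : Int) - 1) "" = ws.getD k' "" := by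
        rw [PySem.List.pyGetD_of_nonneg _ _ (by push_cast; omega)]
        congr 1
        push_cast; omega
      rw [if_pos hpos, hl, show k' + 1 - 1 = k' from rfl]
      cases rest with
      | nil =>
        have hc : ¬ (((k' + 1 : Nat) : Int) < (ws.length : Int) - 1) := by
          simp [hlen]
        rw [if_neg hc]
        rfl
      | cons b rest' =>
        have hc : (((k' + 1 : Nat) : Int) < (ws.length : Int) - 1) := by
          simp [hlen]
        have hr : PySem.List.pyGetD ws (((k' + 1 : Nat) : Int) + 1) "" = b := by
          rw [PySem.List.pyGetD_of_nonneg _ _ (by push_cast; omega)]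
          rw [show (((k' + 1 : Nat) : Int) + 1).toNat = k' + 2 by push_cast; omega]
          exact getD_of_drop_cons ws (k' + 2) b rest' (by simpa using hdrop')
        rw [if_pos hc, hr]
        rfl

theorem A_eq_pass2 (ws : List String) (d : pvWD) :
    (PySem.List.enumerate ws).foldl (pvStepA ws) d = pass2 d none ws := by
  have h := A_eq_pass2_aux ws ws 0 d (by simp)
  simpa using h

theorem sentence_eq (ws : List String) (d : pvWD) :
    (PySem.List.enumerate ws).foldl (pvStepA ws) d
      = (ws.zip ws.tail).foldl pvEdge (ws.foldl pvEnsure d) := by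
  rw [A_eq_pass2, pass2_eq_pass1, pass1_eq_B]

-- A as an interleaved ensure-then-edges fold over the tokenized sentences
theorem A_interleaved (tss : List (List String)) (d : pvWD) :
    tss.foldl (fun d ws => (PySem.List.enumerate ws).foldl (pvStepA ws) d) d
    = tss.foldl (fun d ws => (ws.zip ws.tail).foldl pvEdge (ws.foldl pvEnsure d)) d := by
  induction tss generalizing d with
  | nil => rfl
  | cons ws tss ih =>
    simp only [List.foldl_cons]
    rw [sentence_eq, ih]

-- ---- staging: move all ensures to the front ----

theorem contains_foldl_ensure (l : List String) (d : pvWD) (v : String)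
    (h : d.contains v = true) : (l.foldl pvEnsure d).contains v = true := by
  induction l generalizing d with
  | nil => exact h
  | cons w l ih =>
    exact ih (pvEnsure d w) (by rw [contains_ensure, h, Bool.or_true])

theorem contains_foldl_ensure_of_mem (l : List String) (d : pvWD) (v : String)
    (h : v ∈ l) : (l.foldl pvEnsure d).contains v = true := by
  induction l generalizing d with
  | nil => cases h
  | cons w l ih =>
    rcases List.mem_cons.mp h with rfl | h'
    · exact contains_foldl_ensure l _ v (by rw [contains_ensure]; simp)
    · exact ih (pvEnsure d w) h'

theorem foldl_ensure_edges_comm (es : List (String × String)) (l : List String) (d : pvWD)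
    (h : ∀ e ∈ es, d.contains e.1 = true ∧ d.contains e.2 = true) :
    l.foldl pvEnsure (es.foldl pvEdge d) = es.foldl pvEdge (l.foldl pvEnsure d) := by
  induction es generalizing d with
  | nil => rfl
  | cons e es ih =>
    obtain ⟨a, b⟩ := e
    simp only [List.foldl_cons]
    rw [ih (pvEdge d (a, b)) (fun e' he' => by
          obtain ⟨h1, h2⟩ := h e' (List.mem_cons_of_mem _ he')
          constructor <;> rw [contains_edge] <;> simp [h1, h2]),
        foldl_ensure_edge_comm l d a b (h (a, b) List.mem_cons_self).1
          (h (a, b) List.mem_cons_self).2]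

theorem foldl_ensure_tok_edges_comm (tss : List (List String)) (es : List (String × String)) (d : pvWD)
    (h : ∀ e ∈ es, d.contains e.1 = true ∧ d.contains e.2 = true) :
    tss.foldl (fun d ws => ws.foldl pvEnsure d) (es.foldl pvEdge d)
      = es.foldl pvEdge (tss.foldl (fun d ws => ws.foldl pvEnsure d) d) := by
  induction tss generalizing d with
  | nil => rfl
  | cons ws tss ih =>
    simp only [List.foldl_cons]
    rw [foldl_ensure_edges_comm es ws d h,
        ih (ws.foldl pvEnsure d) (fun e he => ⟨contains_foldl_ensure ws d _ (h e he).1,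
          contains_foldl_ensure ws d _ (h e he).2⟩)]

theorem edge_endpoints_mem (ws : List String) (e : String × String)
    (h : e ∈ ws.zip ws.tail) : e.1 ∈ ws ∧ e.2 ∈ ws := by
  obtain ⟨a, b⟩ := e
  have := List.of_mem_zip h
  exact ⟨this.1, List.mem_of_mem_tail this.2⟩

theorem stage_eq (tss : List (List String)) (d : pvWD) :
    tss.foldl (fun d ws => (ws.zip ws.tail).foldl pvEdge (ws.foldl pvEnsure d)) d
    = tss.foldl (fun d ws => (ws.zip ws.tail).foldl pvEdge d)
        (tss.foldl (fun d ws => ws.foldl pvEnsure d) d) := by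
  induction tss generalizing d with
  | nil => rfl
  | cons ws tss ih =>
    simp only [List.foldl_cons]
    rw [ih ((ws.zip ws.tail).foldl pvEdge (ws.foldl pvEnsure d)),
        ← foldl_ensure_tok_edges_comm tss (ws.zip ws.tail) (ws.foldl pvEnsure d)
          (fun e he => ⟨contains_foldl_ensure_of_mem ws d _ (edge_endpoints_mem ws e he).1,
            contains_foldl_ensure_of_mem ws d _ (edge_endpoints_mem ws e he).2⟩)]

-- ---- stage 1: the order/seen pass builds exactly the global ensure dict ----

theorem order_invariant (ws : List String) (os : List String × PySem.Set String) (d : pvWD)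
    (h1 : d = os.1.foldl (fun d w => d.insert w ([], [])) PySem.Dict.empty)
    (h2 : ∀ v, d.contains v = PySem.Set.contains os.2 v) :
    let os' := ws.foldl (fun os w =>
        if PySem.Set.contains os.2 w then os
        else (os.1 ++ [w], PySem.Set.add os.2 w)) os
    ws.foldl pvEnsure d = os'.1.foldl (fun d w => d.insert w ([], [])) PySem.Dict.empty
      ∧ ∀ v, (ws.foldl pvEnsure d).contains v = PySem.Set.contains os'.2 v := by
  induction ws generalizing os d with
  | nil => exact ⟨h1, h2⟩
  | cons w ws ih =>
    simp only [List.foldl_cons]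
    by_cases hc : PySem.Set.contains os.2 w
    · have hd : d.contains w = true := by rw [h2]; exact hc
      have he : pvEnsure d w = d := by unfold pvEnsure; rw [hd]; simp
      rw [if_pos hc, he]
      exact ih os d h1 h2
    · have hd : d.contains w = false := by rw [h2]; simpa using hc
      have he : pvEnsure d w = d.insert w ([], []) := by unfold pvEnsure; rw [hd]; simp
      rw [if_neg hc, he]
      refine ih (os.1 ++ [w], PySem.Set.add os.2 w) (d.insert w ([], [])) ?_ ?_
      · rw [List.foldl_append, ← h1]
        rfl
      · intro v
        rw [PySem.Dict.contains_insert, h2 v]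
        have h' : ¬ (w ∈ os.2) := by simpa [PySem.Set.contains] using hc
        simp only [PySem.Set.contains, PySem.Set.add, List.contains_eq_mem, h']
        by_cases hvw : v = w <;> simp [hvw]

theorem order_eq (tss : List (List String)) (os : List String × PySem.Set String) (d : pvWD)
    (h1 : d = os.1.foldl (fun d w => d.insert w ([], [])) PySem.Dict.empty)
    (h2 : ∀ v, d.contains v = PySem.Set.contains os.2 v) :
    let os' := tss.foldl (fun os words =>
        words.foldl (fun (os : List String × PySem.Set String) w =>
          if PySem.Set.contains os.2 w then os
          else (os.1 ++ [w], PySem.Set.add os.2 w)) os) os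
    tss.foldl (fun d ws => ws.foldl pvEnsure d) d
      = os'.1.foldl (fun d w => d.insert w ([], [])) PySem.Dict.empty := by
  induction tss generalizing os d with
  | nil => exact h1
  | cons ws tss ih =>
    simp only [List.foldl_cons]
    obtain ⟨g1, g2⟩ := order_invariant ws os d h1 h2
    exact ih _ _ g1 g2

-- ---- stages 2–3: the event stream replays exactly the per-edge updates ----

def pvTwoEv (ab : String × String) : List (String × String × String) :=
  [(ab.2, "left", ab.1), (ab.1, "right", ab.2)]

theorem evStep_pair (d : pvWD) (ab : String × String) :
    (pvTwoEv ab).foldl pvEvStep d = pvEdge d ab := by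
  obtain ⟨a, b⟩ := ab
  rfl

theorem events_flatMap (es : List (String × String)) (ev : List (String × String × String)) :
    es.foldl (fun ev ab => ev ++ [(ab.2, "left", ab.1), (ab.1, "right", ab.2)]) ev
      = ev ++ es.flatMap pvTwoEv := by
  have h := PySem.List.foldl_append_eq_flatMap pvTwoEv es ev
  simpa [pvTwoEv] using h

theorem foldl_evStep_flatMap (es : List (String × String)) (d : pvWD) :
    (es.flatMap pvTwoEv).foldl pvEvStep d = es.foldl pvEdge d := by
  induction es generalizing d with
  | nil => rfl
  | cons ab es ih =>
    rw [List.flatMap_cons, List.foldl_append, evStep_pair, List.foldl_cons, ih]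

theorem events_eq (tss : List (List String)) (ev : List (String × String × String)) :
    tss.foldl (fun ev words =>
        (words.zip words.tail).foldl (fun (ev : List (String × String × String)) ab =>
          ev ++ [(ab.2, "left", ab.1), (ab.1, "right", ab.2)]) ev) ev
      = ev ++ tss.flatMap (fun ws => (ws.zip ws.tail).flatMap pvTwoEv) := by
  induction tss generalizing ev with
  | nil => simp
  | cons ws tss ih =>
    simp only [List.foldl_cons]
    rw [events_flatMap, ih, List.flatMap_cons, List.append_assoc]

theorem foldl_evStep_global (tss : List (List String)) (d : pvWD) :
    ((tss.flatMap (fun ws => (ws.zip ws.tail).flatMap pvTwoEv)).foldl pvEvStep d)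
      = tss.foldl (fun d ws => (ws.zip ws.tail).foldl pvEdge d) d := by
  induction tss generalizing d with
  | nil => rfl
  | cons ws tss ih =>
    rw [List.flatMap_cons, List.foldl_append, foldl_evStep_flatMap, List.foldl_cons, ih]

-- ===== VERDICT (by name: the statement is the Claim_ definition above) =====
theorem generate_word_details_spec : Claim_equal_generate_word_details := by
  intro sentences _
  show generate_word_details sentences = generate_word_details_alt sentences
  unfold generate_word_details generate_word_details_alt
  simp only [events_eq, List.nil_append, foldl_evStep_global]
  have hA : (sentences.foldl (fun d sentence =>
        List.foldl (pvStepA (PySem.Str.split₀ sentence)) d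
          (PySem.List.enumerate (PySem.Str.split₀ sentence))) PySem.Dict.empty)
      = ((sentences.map (fun sentence => PySem.Str.split₀ sentence)).foldl
          (fun d ws => (PySem.List.enumerate ws).foldl (pvStepA ws) d) PySem.Dict.empty) :=
    by rw [List.foldl_map]
  rw [hA, A_interleaved, stage_eq,
      order_eq _ ([], PySem.Set.empty) PySem.Dict.empty rfl (fun v => rfl)]
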